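-- pv_equiv track=rewrite | github.com/ferhatelmas/algo | leetcode/algorithms/medium/partition_array_according_to_the_pivot.py | pivotArray
-- ===== SOURCE A (Python) =====
-- from typing import List
--
-- def pivotArray(nums: List[int], pivot: int) -> List[int]:
--     g, e, l = [], [], []
--     for n in nums:
--         if n == pivot:
--             e.append(n)
--         elif n > pivot:
--             g.append(n)
--         else:
--             l.append(n)
--     return l + e + g
-- ===== SOURCE B (Python) =====
-- from typing import List
--
-- def pivotArray(nums: List[int], pivot: int) -> List[int]:
--     return ([n for n in nums if n < pivot]
--             + [n for n in nums if n == pivot]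
--             + [n for n in nums if n > pivot])
-- ===== Notes on version B (the rewrite author's own statement) =====
-- stated objective: simpler
-- what changed: Replaces the single loop appending into three accumulator lists with three independent filter passes over nums whose results are concatenated.
import Mathlib
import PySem

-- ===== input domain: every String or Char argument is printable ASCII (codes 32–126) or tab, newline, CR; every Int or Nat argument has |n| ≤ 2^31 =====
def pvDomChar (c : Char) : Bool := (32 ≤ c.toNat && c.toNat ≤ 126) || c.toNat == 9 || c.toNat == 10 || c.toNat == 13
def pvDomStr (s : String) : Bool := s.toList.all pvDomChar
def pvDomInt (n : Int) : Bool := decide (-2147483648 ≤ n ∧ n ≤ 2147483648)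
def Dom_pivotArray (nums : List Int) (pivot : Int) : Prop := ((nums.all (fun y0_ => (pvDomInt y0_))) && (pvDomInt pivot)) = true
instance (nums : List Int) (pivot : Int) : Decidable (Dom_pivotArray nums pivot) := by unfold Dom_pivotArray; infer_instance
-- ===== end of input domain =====

-- B rebuilds the result as three independent filter passes (less / equal / greater) concatenated,
-- instead of A's single loop appending into three accumulators; objective: simpler, same cost.

-- ===== PORT A =====
-- one pass, three accumulators g/e/l, in A's branch order
def pivotArrayLoop (pivot : Int) : List Int → List Int × List Int × List Int → List Int × List Int × List Int
  | [], acc => acc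
  | n :: rest, (g, e, l) =>
      if n == pivot then pivotArrayLoop pivot rest (g, e ++ [n], l)
      else if n > pivot then pivotArrayLoop pivot rest (g ++ [n], e, l)
      else pivotArrayLoop pivot rest (g, e, l ++ [n])

def pivotArray (nums : List Int) (pivot : Int) : List Int :=
  let (g, e, l) := pivotArrayLoop pivot nums ([], [], [])
  l ++ e ++ g

-- ===== PORT B =====
def pivotArray_alt (nums : List Int) (pivot : Int) : List Int :=
  nums.filter (fun n => n < pivot) ++ nums.filter (fun n => n == pivot) ++ nums.filter (fun n => n > pivot)

-- ===== PRECONDITION & SPEC =====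
def Spec_pivotArray (nums : List Int) (pivot : Int) (out : List Int) : Prop := out = pivotArray_alt nums pivot
instance (nums : List Int) (pivot : Int) (out : List Int) : Decidable (Spec_pivotArray nums pivot out) := by unfold Spec_pivotArray; infer_instance

-- ===== CLAIM (what is proved, stated in full; the proofs are below) =====
def Claim_equal_pivotArray : Prop := ∀ (nums : List Int) (pivot : Int), Dom_pivotArray nums pivot → Spec_pivotArray nums pivot (pivotArray nums pivot)

-- ===== LEMMAS AND PROOFS =====

-- ===== VERDICT (by name: the statement is the Claim_ definition above) =====
theorem pivotArrayLoop_eq (pivot : Int) (nums g e l : List Int) :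
    pivotArrayLoop pivot nums (g, e, l) =
      (g ++ nums.filter (fun n => n > pivot),
       e ++ nums.filter (fun n => n == pivot),
       l ++ nums.filter (fun n => n < pivot)) := by
  induction nums generalizing g e l with
  | nil => simp [pivotArrayLoop]
  | cons n rest ih =>
      by_cases h1 : n = pivot
      · simp [pivotArrayLoop, h1, List.filter, ih]
      · have hb : (n == pivot) = false := by simpa using h1
        by_cases h2 : n > pivot
        · have : ¬ n < pivot := by omega
          simp [pivotArrayLoop, hb, h2, this, List.filter, ih]
        · have h3 : n < pivot := by omega
          simp [pivotArrayLoop, hb, h2, h3, List.filter, ih]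

theorem pivotArray_spec : Claim_equal_pivotArray := by
  intro nums pivot _
  unfold Spec_pivotArray pivotArray pivotArray_alt
  simp [pivotArrayLoop_eq]
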